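-- pv_equiv track=rewrite | github.com/2CentsCapitalHR/ai-engineer-task-nunkesh | app.py | _determine_compliance_status
-- ===== SOURCE A (Python) =====
-- from typing import Dict, List, Tuple, Optional, Any
--
-- def _determine_compliance_status(issues: List[Dict[str, Any]]) -> str:
--     """Determine overall compliance status"""
--     if not issues:
--         return "compliant"
--
--     critical_issues = [issue for issue in issues if issue["severity"] == "critical"]
--     high_issues = [issue for issue in issues if issue["severity"] == "high"]
--
--     if critical_issues:
--         return "non_compliant"
--     elif high_issues:
--         return "needs_attention"
--     else:
--         return "minor_issues"
-- ===== SOURCE B (Python) =====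
-- def _determine_compliance_status(issues):
--     """Determine overall compliance status"""
--     if not issues:
--         return "compliant"
--     has_high = False
--     for issue in issues:
--         sev = issue["severity"]
--         if sev == "critical":
--             return "non_compliant"
--         if sev == "high":
--             has_high = True
--     return "needs_attention" if has_high else "minor_issues"
-- ===== Notes on version B (the rewrite author's own statement) =====
-- stated objective: simpler
-- what changed: Replaces A's two separate filtered-list builds with a single pass that returns immediately on a critical issue and otherwise tracks one boolean for high issues.
import Mathlib
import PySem

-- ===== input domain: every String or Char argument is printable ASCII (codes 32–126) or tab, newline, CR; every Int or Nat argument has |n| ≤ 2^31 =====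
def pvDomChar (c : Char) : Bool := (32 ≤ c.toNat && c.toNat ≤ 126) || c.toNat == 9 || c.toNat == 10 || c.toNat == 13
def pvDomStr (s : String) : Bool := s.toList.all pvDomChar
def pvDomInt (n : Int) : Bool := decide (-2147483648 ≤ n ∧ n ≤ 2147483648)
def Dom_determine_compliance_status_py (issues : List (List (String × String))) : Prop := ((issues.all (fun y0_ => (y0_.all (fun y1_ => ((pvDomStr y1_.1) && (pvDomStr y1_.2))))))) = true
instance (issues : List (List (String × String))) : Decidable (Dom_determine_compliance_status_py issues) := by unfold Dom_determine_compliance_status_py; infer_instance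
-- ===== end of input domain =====

-- B replaces A's two filtered-list scans by a single early-exit pass with one boolean; return value only.
-- ===== PORT A =====
def determine_compliance_status_py (issues : List (List (String × String))) : String :=
  if issues = [] then "compliant"
  else
    let critical_issues := issues.filter (fun issue => PySem.Dict.getD (PySem.Dict.mk issue) "severity" "" = "critical")
    let high_issues := issues.filter (fun issue => PySem.Dict.getD (PySem.Dict.mk issue) "severity" "" = "high")
    if critical_issues ≠ [] then "non_compliant"
    else if high_issues ≠ [] then "needs_attention"
    else "minor_issues"

-- ===== PORT B =====
def pvBLoop (issues : List (List (String × String))) (has_high : Bool) : String :=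
  match issues with
  | [] => if has_high then "needs_attention" else "minor_issues"
  | issue :: rest =>
    let sev := PySem.Dict.getD (PySem.Dict.mk issue) "severity" ""
    if sev = "critical" then "non_compliant"
    else pvBLoop rest (has_high || sev = "high")

def determine_compliance_status_py_alt (issues : List (List (String × String))) : String :=
  if issues = [] then "compliant" else pvBLoop issues false

-- ===== PRECONDITION & SPEC =====
-- Pre_ excludes issues missing the "severity" key, where Python A raises KeyError.
def Pre_determine_compliance_status_py (issues : List (List (String × String))) : Prop :=
  (issues.all (fun issue => (PySem.Dict.get? (PySem.Dict.mk issue) "severity").isSome)) = true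
instance (issues : List (List (String × String))) : Decidable (Pre_determine_compliance_status_py issues) := by unfold Pre_determine_compliance_status_py; infer_instance
def pvWitness_determine_compliance_status_py : (List (List (String × String))) := [[("severity", "high")], [("severity", "low")]]
def Spec_determine_compliance_status_py (issues : List (List (String × String))) (out : String) : Prop := out = determine_compliance_status_py_alt issues
instance (issues : List (List (String × String))) (out : String) : Decidable (Spec_determine_compliance_status_py issues out) := by unfold Spec_determine_compliance_status_py; infer_instance

-- ===== CLAIM =====
def Claim_equal_determine_compliance_status_py : Prop := ∀ (issues : List (List (String × String))), Dom_determine_compliance_status_py issues → Pre_determine_compliance_status_py issues → Spec_determine_compliance_status_py issues (determine_compliance_status_py issues)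

-- ===== LEMMAS AND PROOFS =====
lemma pvBLoop_char (issues : List (List (String × String))) (hh : Bool) :
    pvBLoop issues hh =
      if issues.any (fun issue => PySem.Dict.getD (PySem.Dict.mk issue) "severity" "" = "critical") then "non_compliant"
      else if hh || issues.any (fun issue => PySem.Dict.getD (PySem.Dict.mk issue) "severity" "" = "high") then "needs_attention"
      else "minor_issues" := by
  induction issues generalizing hh with
  | nil => simp [pvBLoop]
  | cons issue rest ih =>
    simp only [pvBLoop, List.any_cons]
    by_cases hc : PySem.Dict.getD (PySem.Dict.mk issue) "severity" "" = "critical"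
    · simp [hc]
    · rw [ih]
      by_cases hcr : rest.any (fun issue => PySem.Dict.getD (PySem.Dict.mk issue) "severity" "" = "critical")
      · simp [hc, hcr]
      · by_cases hhi : PySem.Dict.getD (PySem.Dict.mk issue) "severity" "" = "high" <;> simp [hc, hcr, hhi]

-- ===== VERDICT =====
theorem determine_compliance_status_py_spec : Claim_equal_determine_compliance_status_py := by
  intro issues _ _
  unfold Spec_determine_compliance_status_py determine_compliance_status_py determine_compliance_status_py_alt
  by_cases h : issues = []
  · simp [h]
  · rw [pvBLoop_char]
    simp only [if_neg h, Bool.false_or]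
    by_cases hc : issues.any (fun issue => PySem.Dict.getD (PySem.Dict.mk issue) "severity" "" = "critical") <;>
    by_cases hhi : issues.any (fun issue => PySem.Dict.getD (PySem.Dict.mk issue) "severity" "" = "high") <;>
      simp_all [List.filter_eq_nil_iff, List.any_eq_true]
    rw [if_neg (by push Not; exact hc), if_neg (by push Not; exact hhi)]
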